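-- pv_equiv track=rewrite | github.com/FeilyZhang/PkuLaw | app3.py | getContent
-- ===== SOURCE A (Python) =====
-- def getContent(str):
--     num = 0
--     rst = ''
--     for e in str:
--         if e == '<':
--             num += 1
--         elif e == '>':
--             num -= 1
--         elif num == 0:
--             rst += e
--     return rst
-- ===== SOURCE B (Python) =====
-- def getContent(str):
--     # Split the input into chunks at '<'; each chunk splits at '>' into pieces
--     # whose depths descend by one, so at most ONE piece per chunk (index == depth)
--     # is at depth 0 and visible.  Emit whole pieces instead of scanning characters.
--     out = []
--     depth = 0
--     for k, chunk in enumerate(str.split('<')):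
--         depth += (k > 0)
--         pieces = chunk.split('>')
--         if 0 <= depth < len(pieces):
--             out.append(pieces[depth])
--         depth -= len(pieces) - 1
--     return ''.join(out)
-- ===== Notes on version B (the rewrite author's own statement) =====
-- stated objective: faster
-- what changed: Replaces A's per-character depth-counter scan with a segment algorithm: split the string at '<', split each chunk at '>', and since piece depths inside a chunk descend by one, emit the single whole piece per chunk whose index equals the current depth.
import Mathlib
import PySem

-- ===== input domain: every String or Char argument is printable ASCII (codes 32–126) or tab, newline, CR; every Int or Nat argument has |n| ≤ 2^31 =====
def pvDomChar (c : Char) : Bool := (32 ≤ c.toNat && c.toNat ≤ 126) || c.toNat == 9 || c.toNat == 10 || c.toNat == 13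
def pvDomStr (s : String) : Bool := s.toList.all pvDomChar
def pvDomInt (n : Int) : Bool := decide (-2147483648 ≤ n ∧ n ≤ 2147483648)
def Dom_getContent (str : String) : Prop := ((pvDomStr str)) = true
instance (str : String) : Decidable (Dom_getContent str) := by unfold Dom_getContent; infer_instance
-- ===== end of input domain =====

-- B replaces A's per-character depth-counter scan by a segment algorithm: split at '<', split each
-- chunk at '>', and emit the single piece per chunk whose index equals the current depth
-- (equal return values; a timing run measured B faster at the largest size).

-- ===== PORT A =====
-- A's single scan: counter num plus accumulated result string.
def getContentStep (st : Int × List Char) (e : Char) : Int × List Char :=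
  if e = '<' then (st.1 + 1, st.2)
  else if e = '>' then (st.1 - 1, st.2)
  else if st.1 = 0 then (st.1, st.2 ++ [e])
  else st

def getContent (str : String) : String :=
  String.mk (str.toList.foldl getContentStep (0, [])).2

-- ===== PORT B =====
-- one iteration of Source B's loop body over (k, chunk); out is kept as the already-joined
-- character list (''.join of appended pieces = their concatenation)
def gcAltStep (st : Int × List Char) (kc : Int × List Char) : Int × List Char :=
  let d := st.1 + (if 0 < kc.1 then 1 else 0)                         -- depth += (k > 0)
  let pieces := PySem.Chars.splitOn kc.2 ['>']                        -- pieces = chunk.split('>')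
  let out := if 0 ≤ d ∧ d < (pieces.length : Int)                     -- if 0 <= depth < len(pieces):
               then st.2 ++ pieces.getD d.toNat [] else st.2          --   out.append(pieces[depth])
  (d - ((pieces.length : Int) - 1), out)                              -- depth -= len(pieces) - 1

def getContent_alt (str : String) : String :=
  String.mk ((PySem.List.enumerate (PySem.Chars.splitOn str.toList ['<']) 0).foldl gcAltStep (0, [])).2

-- ===== PRECONDITION & SPEC =====
def Spec_getContent (str : String) (out : String) : Prop := out = getContent_alt str
instance (str : String) (out : String) : Decidable (Spec_getContent str out) := by unfold Spec_getContent; infer_instance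

-- ===== CLAIM (what is proved, stated in full; the proofs are below) =====
def Claim_equal_getContent : Prop := ∀ (str : String), Dom_getContent str → Spec_getContent str (getContent str)

-- ===== LEMMAS AND PROOFS =====

-- splitting a list at a single-character separator, recursively
def splitOne (sep : Char) : List Char → List (List Char)
  | [] => [[]]
  | c :: r => if c = sep then [] :: splitOne sep r else (splitOne sep r).modifyHead (c :: ·)

theorem splitOne_ne_nil (sep : Char) (l : List Char) : splitOne sep l ≠ [] := by
  cases l with
  | nil => simp [splitOne]
  | cons c r =>
    simp only [splitOne]
    split
    · simp
    · cases h : splitOne sep r with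
      | nil => exact absurd h (splitOne_ne_nil sep r)
      | cons a t => simp [List.modifyHead]

theorem splitOn_go_single (sep : Char) : ∀ (fuel : Nat) (l cur : List Char) (acc : List (List Char)),
    l.length ≤ fuel →
    PySem.Chars.splitOn.go [sep] fuel l cur acc
      = acc.reverse ++ (splitOne sep l).modifyHead (cur.reverse ++ ·) := by
  intro fuel
  induction fuel with
  | zero =>
    intro l cur acc h
    have : l = [] := by cases l <;> simp_all
    subst this
    simp [PySem.Chars.splitOn.go, splitOne]
  | succ n ih =>
    intro l cur acc h
    cases l with
    | nil => simp [PySem.Chars.splitOn.go, splitOne]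
    | cons c r =>
      rw [PySem.Chars.splitOn.go.eq_def]
      simp only []
      by_cases hc : c = sep
      · subst hc
        have hp : List.isPrefixOf [c] (c :: r) = true := by simp [List.isPrefixOf]
        rw [if_pos hp]
        simp only [List.length_cons] at h
        rw [show List.drop [c].length (c :: r) = r by simp]
        rw [ih r [] (cur.reverse :: acc) (by omega)]
        cases hsr : splitOne c r with
        | nil => exact absurd hsr (splitOne_ne_nil c r)
        | cons a t => simp [splitOne, hsr, List.modifyHead]
      · have hp : List.isPrefixOf [sep] (c :: r) = false := by
          simp [List.isPrefixOf]; exact fun hh => absurd hh.symm hc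
        rw [if_neg (by simp [hp])]
        simp only [List.length_cons] at h
        rw [ih r (c :: cur) acc (by omega)]
        cases hr : splitOne sep r with
        | nil => exact absurd hr (splitOne_ne_nil sep r)
        | cons a t =>
          simp only [splitOne, if_neg hc, hr, List.modifyHead, List.reverse_cons,
            List.append_assoc, List.cons_append, List.nil_append]

theorem splitOn_singleton (sep : Char) (l : List Char) :
    PySem.Chars.splitOn l [sep] = splitOne sep l := by
  unfold PySem.Chars.splitOn
  rw [splitOn_go_single sep (l.length + 1) l [] [] (by omega)]
  cases h : splitOne sep l with
  | nil => exact absurd h (splitOne_ne_nil sep l)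
  | cons a t => simp [List.modifyHead]

-- the one visible piece of a chunk: the piece whose index equals the depth, if any
def pick (d : Int) (ps : List (List Char)) : List Char :=
  if 0 ≤ d ∧ d < (ps.length : Int) then ps.getD d.toNat [] else []

-- what A's loop emits from state depth d
def emitA (d : Int) : List Char → List Char
  | [] => []
  | c :: r =>
    if c = '<' then emitA (d + 1) r
    else if c = '>' then emitA (d - 1) r
    else (if d = 0 then [c] else []) ++ emitA d r

-- what B emits over a chunk list, head chunk at depth d, later chunks one deeper each
def chunksB (d : Int) : List (List Char) → List Char
  | [] => []
  | ch :: rest =>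
    let ps := splitOne '>' ch
    pick d ps ++ chunksB (d - ((ps.length : Int) - 1) + 1) rest

theorem emitA_foldl (l : List Char) : ∀ (d : Int) (acc : List Char),
    (l.foldl getContentStep (d, acc)).2 = acc ++ emitA d l := by
  induction l with
  | nil => intro d acc; simp [emitA]
  | cons c r ih =>
    intro d acc
    by_cases h1 : c = '<'
    · simp [getContentStep, emitA, h1, ih]
    · by_cases h2 : c = '>'
      · subst h2
        have hs : getContentStep (d, acc) '>' = (d - 1, acc) := by
          simp [getContentStep]
        rw [List.foldl_cons, hs, ih (d - 1) acc]
        simp [emitA, h1]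
      · by_cases h3 : d = 0 <;> simp [getContentStep, emitA, h1, h2, h3, ih]

theorem pick_cons_nil (d : Int) (P : List (List Char)) :
    pick d ([] :: P) = pick (d - 1) P := by
  simp only [pick, List.length_cons, Nat.cast_add, Nat.cast_one]
  by_cases hd : 1 ≤ d ∧ d - 1 < (P.length : Int)
  · rw [if_pos (by omega), if_pos (by omega)]
    have h1 : d.toNat = (d - 1).toNat + 1 := by omega
    rw [h1]
    simp
  · by_cases hz : d = 0
    · subst hz
      rw [if_pos (by omega), if_neg (by omega)]
      simp
    · rw [if_neg (by omega), if_neg (by omega)]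

theorem pick_cons_cons (c : Char) (p : List Char) (q : List (List Char)) (d : Int) :
    pick d ((c :: p) :: q) = (if d = 0 then [c] else []) ++ pick d (p :: q) := by
  simp only [pick, List.length_cons, Nat.cast_add, Nat.cast_one]
  by_cases hd : d = 0
  · subst hd; simp
  · rw [if_neg hd]
    by_cases hin : 1 ≤ d ∧ d < ((q.length : Int) + 1)
    · rw [if_pos (by omega), if_pos (by omega)]
      have h1 : d.toNat = (d.toNat - 1) + 1 := by omega
      rw [h1]
      simp
    · rw [if_neg (by omega), if_neg (by omega)]
      simp

-- an empty head chunk: nothing visible, the rest one level deeper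
theorem chunksB_cons_nil (d : Int) (rest : List (List Char)) :
    chunksB d ([] :: rest) = chunksB (d + 1) rest := by
  simp only [chunksB, splitOne]
  have hp : pick d [[]] = [] := by
    unfold pick
    split_ifs with h
    · have : d = 0 := by simp at h; omega
      simp [this]
    · rfl
  rw [hp]
  norm_num

-- a head chunk starting with '>': depth drops by one
theorem chunksB_head_gt (d : Int) (h : List Char) (t : List (List Char)) :
    chunksB d (('>' :: h) :: t) = chunksB (d - 1) (h :: t) := by
  have hs : splitOne '>' ('>' :: h) = [] :: splitOne '>' h := by simp [splitOne]
  simp only [chunksB, hs, pick_cons_nil, List.length_cons]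
  congr 1
  push_cast
  ring

-- a head chunk starting with an ordinary character: it is visible iff the depth is 0
theorem chunksB_head_other (c : Char) (hc : c ≠ '>') (d : Int) (h : List Char)
    (t : List (List Char)) :
    chunksB d ((c :: h) :: t) = (if d = 0 then [c] else []) ++ chunksB d (h :: t) := by
  cases hph : splitOne '>' h with
  | nil => exact absurd hph (splitOne_ne_nil '>' h)
  | cons p q =>
    simp only [chunksB, splitOne, if_neg hc, hph, List.modifyHead]
    rw [pick_cons_cons]
    simp only [List.length_cons, List.append_assoc]

-- A's emission equals B's chunkwise emission
theorem emitA_eq_chunksB (l : List Char) : ∀ (d : Int),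
    emitA d l = chunksB d (splitOne '<' l) := by
  induction l with
  | nil =>
    intro d
    rw [show splitOne '<' [] = [[]] from rfl, chunksB_cons_nil]
    simp [emitA, chunksB]
  | cons c r ih =>
    intro d
    by_cases h1 : c = '<'
    · subst h1
      rw [show splitOne '<' ('<' :: r) = [] :: splitOne '<' r by simp [splitOne],
          chunksB_cons_nil]
      simp only [emitA, if_pos rfl]
      exact ih (d + 1)
    · cases hr : splitOne '<' r with
      | nil => exact absurd hr (splitOne_ne_nil '<' r)
      | cons h t =>
        by_cases h2 : c = '>'
        · subst h2
          rw [show splitOne '<' ('>' :: r) = ('>' :: h) :: t by simp [splitOne, hr],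
              chunksB_head_gt, ← hr]
          simp only [emitA, if_neg (by decide : ¬ ('>' : Char) = '<'), if_pos rfl]
          exact ih (d - 1)
        · rw [show splitOne '<' (c :: r) = (c :: h) :: t by simp [splitOne, h1, hr],
              chunksB_head_other c h2, ← hr]
          simp only [emitA, if_neg h1, if_neg h2]
          rw [ih d]

-- Source B's loop over the enumerated tail (all indices ≥ 1) is chunksB one level deeper
theorem foldl_enumerate_tail (rest : List (List Char)) : ∀ (j d : Int) (out : List Char),
    1 ≤ j →
    ((PySem.List.enumerate rest j).foldl gcAltStep (d, out)).2 = out ++ chunksB (d + 1) rest := by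
  induction rest with
  | nil => intro j d out _; simp [PySem.List.enumerate, chunksB]
  | cons ch r ih =>
    intro j d out hj
    simp only [PySem.List.enumerate, List.foldl_cons]
    have hstep : gcAltStep (d, out) (j, ch)
        = (d + 1 - (((PySem.Chars.splitOn ch ['>']).length : Int) - 1),
           out ++ pick (d + 1) (PySem.Chars.splitOn ch ['>'])) := by
      simp only [gcAltStep, pick, if_pos (by omega : (0:Int) < j)]
      split_ifs <;> first | rfl | simp | omega
    rw [hstep, ih (j + 1) _ _ (by omega)]
    simp only [chunksB, splitOn_singleton, List.append_assoc]

-- the whole of Source B's loop computes chunksB 0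
theorem foldl_enumerate_chunks (ch : List Char) (rest : List (List Char)) :
    ((PySem.List.enumerate (ch :: rest) 0).foldl gcAltStep (0, [])).2
      = chunksB 0 (ch :: rest) := by
  simp only [PySem.List.enumerate, List.foldl_cons]
  have hstep : gcAltStep (0, []) (0, ch)
      = ((0 : Int) - (((PySem.Chars.splitOn ch ['>']).length : Int) - 1),
         pick 0 (PySem.Chars.splitOn ch ['>'])) := by
    simp only [gcAltStep, pick, if_neg (by omega : ¬ (0:Int) < 0), add_zero, zero_add]
    split_ifs <;> rfl
  rw [hstep, foldl_enumerate_tail rest (0 + 1) _ _ (by omega)]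
  simp only [chunksB, splitOn_singleton, zero_sub, List.nil_append]

-- ===== VERDICT (by name: the statement is the Claim_ definition above) =====
theorem getContent_spec : Claim_equal_getContent := by
  intro str _
  unfold Spec_getContent getContent getContent_alt
  rw [emitA_foldl]
  cases hr : PySem.Chars.splitOn str.toList ['<'] with
  | nil => exact absurd ((splitOn_singleton '<' str.toList).symm.trans hr)
             (splitOne_ne_nil '<' str.toList)
  | cons ch rest =>
    rw [foldl_enumerate_chunks, ← hr, splitOn_singleton, ← emitA_eq_chunksB]
    simp
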